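-- pv_equiv track=rewrite | github.com/shyam-DSA/dp-problems-table-generator | knapsack_react_flask/backend/app.py | solve_scs
-- ===== SOURCE A (Python) =====
-- def solve_scs(s1, s2):
--     m, n = len(s1), len(s2)
--     dp = [[0] * (n + 1) for _ in range(m + 1)]
--     for i in range(m + 1):
--         dp[i][0] = i
--     for j in range(n + 1):
--         dp[0][j] = j
--     for i in range(1, m + 1):
--         for j in range(1, n + 1):
--             if s1[i - 1] == s2[j - 1]:
--                 dp[i][j] = dp[i - 1][j - 1] + 1
--             else:
--                 dp[i][j] = min(dp[i - 1][j], dp[i][j - 1]) + 1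
--     return dp
-- ===== SOURCE B (Python) =====
-- def solve_scs(s1, s2):
--     m, n = len(s1), len(s2)
--     # Pass 1: LCS length table (max-based recurrence, zero base row/column).
--     lcs = [[0] * (n + 1) for _ in range(m + 1)]
--     for i in range(1, m + 1):
--         for j in range(1, n + 1):
--             if s1[i - 1] == s2[j - 1]:
--                 lcs[i][j] = lcs[i - 1][j - 1] + 1
--             else:
--                 lcs[i][j] = max(lcs[i - 1][j], lcs[i][j - 1])
--     # Pass 2: SCS length via the identity SCS(i,j) = i + j - LCS(i,j).
--     return [[i + j - lcs[i][j] for j in range(n + 1)] for i in range(m + 1)]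
-- ===== Notes on version B (the rewrite author's own statement) =====
-- stated objective: alternative
-- what changed: B computes a max-based LCS table and then derives the SCS table in a second pass via the identity SCS(i,j)=i+j-LCS(i,j), instead of A's direct min-based SCS recurrence with boundary initialisation.
import Mathlib
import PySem

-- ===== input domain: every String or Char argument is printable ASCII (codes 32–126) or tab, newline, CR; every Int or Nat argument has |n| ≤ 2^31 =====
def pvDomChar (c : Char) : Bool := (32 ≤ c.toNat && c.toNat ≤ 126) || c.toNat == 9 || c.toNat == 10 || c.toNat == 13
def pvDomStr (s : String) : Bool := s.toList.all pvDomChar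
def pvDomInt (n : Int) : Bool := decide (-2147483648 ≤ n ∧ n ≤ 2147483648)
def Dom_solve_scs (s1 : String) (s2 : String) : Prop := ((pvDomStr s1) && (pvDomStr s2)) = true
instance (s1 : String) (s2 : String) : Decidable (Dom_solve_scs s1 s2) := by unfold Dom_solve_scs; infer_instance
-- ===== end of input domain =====

-- B replaces A's direct min-based SCS recurrence by an LCS table (max recurrence)
-- plus a transform pass using SCS(i,j) = i+j-LCS(i,j); alternative algorithm, same cost.


-- ===== PORT A =====
-- inner loop over j (row i), carrying prev row suffix [dp[i-1][j-1..]] and left = dp[i][j-1]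
def scsRowA (c1 : Char) : List Char → List Int → Int → List Int
  | c2 :: cs, diag :: up :: rest, left =>
    let cur := if c1 = c2 then diag + 1 else min up left + 1
    cur :: scsRowA c1 cs (up :: rest) cur
  | _, _, _ => []

-- outer loop over i = 1..m; each row starts with dp[i][0] = i
def scsRowsA (s2c : List Char) : List Char → List Int → Int → List (List Int)
  | [], _, _ => []
  | c1 :: cs, prev, i =>
    let r := i :: scsRowA c1 s2c prev i
    r :: scsRowsA s2c cs r (i + 1)

-- the base row dp[0][j] = j for j = 0..n
def iotaRow : Int → Nat → List Int
  | _, 0 => []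
  | t, k + 1 => t :: iotaRow (t + 1) k

def solve_scs (s1 : String) (s2 : String) : List (List Int) :=
  let s1c := s1.toList
  let s2c := s2.toList
  let row0 := iotaRow 0 (s2c.length + 1)
  row0 :: scsRowsA s2c s1c row0 1

-- ===== PORT B =====
-- pass 1 inner loop: LCS row, prev row suffix and left = lcs[i][j-1]
def lcsRowB (c1 : Char) : List Char → List Int → Int → List Int
  | c2 :: cs, diag :: up :: rest, left =>
    let cur := if c1 = c2 then diag + 1 else max up left
    cur :: lcsRowB c1 cs (up :: rest) cur
  | _, _, _ => []

-- pass 1 outer loop: LCS rows i = 1..m, each starting with lcs[i][0] = 0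
def lcsRowsB (s2c : List Char) : List Char → List Int → List (List Int)
  | [], _ => []
  | c1 :: cs, prev =>
    let r := 0 :: lcsRowB c1 s2c prev 0
    r :: lcsRowsB s2c cs r

-- pass 2: [[i + j - lcs[i][j] for j in …] for i in …], index carried as t = i + j
def tfRowB (t : Int) : List Int → List Int
  | [] => []
  | v :: vs => (t - v) :: tfRowB (t + 1) vs

def tfB (i : Int) : List (List Int) → List (List Int)
  | [] => []
  | r :: rs => tfRowB i r :: tfB (i + 1) rs

def solve_scs_alt (s1 : String) (s2 : String) : List (List Int) :=
  let s1c := s1.toList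
  let s2c := s2.toList
  let row0 := List.replicate (s2c.length + 1) (0 : Int)
  tfB 0 (row0 :: lcsRowsB s2c s1c row0)

-- ===== PRECONDITION & SPEC =====
def Spec_solve_scs (s1 : String) (s2 : String) (out : List (List Int)) : Prop := out = solve_scs_alt s1 s2
instance (s1 : String) (s2 : String) (out : List (List Int)) : Decidable (Spec_solve_scs s1 s2 out) := by unfold Spec_solve_scs; infer_instance

-- ===== CLAIM (what is proved, stated in full; the proofs are below) =====
def Claim_equal_solve_scs : Prop := ∀ (s1 : String) (s2 : String), Dom_solve_scs s1 s2 → Spec_solve_scs s1 s2 (solve_scs s1 s2)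

-- ===== LEMMAS AND PROOFS =====

-- PVRel t a b: a and b have the same length and a[k] = (t+k) - b[k]
def PVRel : Int → List Int → List Int → Prop
  | t, a :: as, b :: bs => a = t - b ∧ PVRel (t + 1) as bs
  | _, [], [] => True
  | _, _, _ => False

theorem PVRel_cons (t a b : Int) (as bs : List Int) :
    PVRel t (a :: as) (b :: bs) ↔ a = t - b ∧ PVRel (t + 1) as bs := by
  simp [PVRel]

theorem rel_tfRow : ∀ (b : List Int) (t : Int) (a : List Int), PVRel t a b → a = tfRowB t b := by
  intro b
  induction b with
  | nil =>
    intro t a h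
    cases a with
    | nil => simp [tfRowB]
    | cons x xs => simp [PVRel] at h
  | cons v vs ih =>
    intro t a h
    cases a with
    | nil => simp [PVRel] at h
    | cons x xs =>
      rw [PVRel_cons] at h
      obtain ⟨h1, h2⟩ := h
      simp [tfRowB, h1, ih _ _ h2]

theorem rel_row (c1 : Char) : ∀ (cs : List Char) (pa pb : List Int) (t la lb : Int),
    PVRel t pa pb → la = t + 1 - lb →
    PVRel (t + 2) (scsRowA c1 cs pa la) (lcsRowB c1 cs pb lb) := by
  intro cs
  induction cs with
  | nil =>
    intro pa pb t la lb _ _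
    cases pa <;> cases pb <;> simp [scsRowA, lcsRowB, PVRel]
  | cons c2 cs ih =>
    intro pa pb t la lb hrel hl
    match pa, pb with
    | [], [] => simp [scsRowA, lcsRowB, PVRel]
    | [_], [_] => simp [scsRowA, lcsRowB, PVRel]
    | [], _ :: _ => simp [PVRel] at hrel
    | _ :: _, [] => simp [PVRel] at hrel
    | [a0], b0 :: b1 :: bs => rw [PVRel_cons] at hrel; simp [PVRel] at hrel
    | a0 :: a1 :: as, [b0] => rw [PVRel_cons] at hrel; simp [PVRel] at hrel
    | a0 :: a1 :: as, b0 :: b1 :: bs =>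
      rw [PVRel_cons] at hrel
      obtain ⟨h0, hrel⟩ := hrel
      rw [PVRel_cons] at hrel
      obtain ⟨h1, hrest⟩ := hrel
      simp only [scsRowA, lcsRowB]
      by_cases hc : c1 = c2
      · simp only [if_pos hc]
        rw [PVRel_cons]
        refine ⟨by omega, ?_⟩
        have e : t + 2 + 1 = (t + 1) + 2 := by ring
        rw [e]
        exact ih (a1 :: as) (b1 :: bs) (t + 1) (a0 + 1) (b0 + 1)
          ((PVRel_cons _ _ _ _ _).mpr ⟨h1, hrest⟩) (by omega)
      · simp only [if_neg hc]
        have hcur : min a1 la + 1 = t + 2 - max b1 lb := by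
          simp only [min_def, max_def]
          split_ifs <;> omega
        rw [PVRel_cons]
        refine ⟨hcur, ?_⟩
        have e : t + 2 + 1 = (t + 1) + 2 := by ring
        rw [e]
        exact ih (a1 :: as) (b1 :: bs) (t + 1) (min a1 la + 1) (max b1 lb)
          ((PVRel_cons _ _ _ _ _).mpr ⟨h1, hrest⟩) (by omega)

theorem rel_rows (s2c : List Char) : ∀ (cs : List Char) (pa pb : List Int) (i : Int),
    PVRel i pa pb →
    scsRowsA s2c cs pa (i + 1) = tfB (i + 1) (lcsRowsB s2c cs pb) := by
  intro cs
  induction cs with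
  | nil => intro pa pb i _; simp [scsRowsA, lcsRowsB, tfB]
  | cons c1 cs ih =>
    intro pa pb i hrel
    simp only [scsRowsA, lcsRowsB, tfB]
    have hrow : PVRel (i + 1) ((i + 1) :: scsRowA c1 s2c pa (i + 1))
        (0 :: lcsRowB c1 s2c pb 0) := by
      rw [PVRel_cons]
      refine ⟨by omega, ?_⟩
      have e : i + 1 + 1 = i + 2 := by ring
      rw [e]
      exact rel_row c1 s2c pa pb i (i + 1) 0 hrel (by omega)
    exact List.cons_eq_cons.mpr ⟨rel_tfRow _ _ _ hrow, ih _ _ (i + 1) hrow⟩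

theorem rel_base : ∀ (k : Nat) (t : Int), PVRel t (iotaRow t k) (List.replicate k (0 : Int)) := by
  intro k
  induction k with
  | zero => intro t; simp [iotaRow, List.replicate, PVRel]
  | succ n ih =>
    intro t
    simp only [iotaRow, List.replicate]
    rw [PVRel_cons]
    exact ⟨by omega, ih (t + 1)⟩

-- ===== VERDICT (by name: the statement is the Claim_ definition above) =====
theorem solve_scs_spec : Claim_equal_solve_scs := by
  intro s1 s2 _
  unfold Spec_solve_scs solve_scs solve_scs_alt
  simp only [tfB]
  have hbase := rel_base (s2.toList.length + 1) 0
  refine List.cons_eq_cons.mpr ⟨rel_tfRow _ _ _ hbase, ?_⟩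
  have := rel_rows s2.toList s1.toList _ _ 0 hbase
  norm_num at this ⊢
  exact this
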